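-- pv_equiv track=rewrite | github.com/CrisDxyz/Sistema_TodoMarket | Func.py | getFechas
-- ===== SOURCE A (Python) =====
-- def getFechas(fechas):
--     fechaIni=''
--     fechaFin=''
--     for letra in fechas:
--         if letra == ' ':
--             break
--         fechaIni=fechaIni+letra
--     for letra in reversed(fechas):
--         if letra == ' ':
--             break
--         fechaFin=letra+fechaFin
--     return fechaIni,fechaFin
-- ===== SOURCE B (Python) =====
-- def getFechas(fechas):
--     parts = fechas.split(' ')
--     return parts[0], parts[-1]
-- ===== Notes on version B (the rewrite author's own statement) =====
-- stated objective: faster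
-- what changed: Replaces A's two directional character-by-character scans that grow strings by repeated concatenation (quadratic in token length) by a single split(' ') tokenization indexed at both ends.
import Mathlib
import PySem

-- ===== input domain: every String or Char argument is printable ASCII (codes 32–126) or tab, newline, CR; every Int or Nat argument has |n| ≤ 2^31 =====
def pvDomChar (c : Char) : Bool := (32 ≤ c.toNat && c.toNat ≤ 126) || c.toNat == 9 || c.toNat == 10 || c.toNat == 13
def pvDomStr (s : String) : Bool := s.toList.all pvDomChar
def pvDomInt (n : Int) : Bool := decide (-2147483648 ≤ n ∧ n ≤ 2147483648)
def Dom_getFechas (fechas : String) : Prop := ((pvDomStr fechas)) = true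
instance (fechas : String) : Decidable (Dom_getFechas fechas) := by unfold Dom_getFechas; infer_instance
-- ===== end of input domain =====

-- B replaces A's two directional break-scans by one split(' ') indexed at both ends (simpler).


-- ===== PORT A =====
-- first loop: for letra in fechas: if letra==' ': break; fechaIni = fechaIni + letra
def getFechasIniLoop : List Char → List Char → List Char
  | [], acc => acc
  | c :: rest, acc => if c = ' ' then acc else getFechasIniLoop rest (acc ++ [c])

-- second loop: for letra in reversed(fechas): if letra==' ': break; fechaFin = letra + fechaFin
def getFechasFinLoop : List Char → List Char → List Char
  | [], acc => acc
  | c :: rest, acc => if c = ' ' then acc else getFechasFinLoop rest (c :: acc)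

def getFechas (fechas : String) : String × String :=
  let fechaIni := getFechasIniLoop fechas.toList []
  let fechaFin := getFechasFinLoop fechas.toList.reverse []
  (String.ofList fechaIni, String.ofList fechaFin)

-- ===== PORT B =====
-- parts = fechas.split(' '); return parts[0], parts[-1]
-- split? " " is always `some`, and parts is always nonempty, so the getD defaults are unreachable totalization guards
def getFechas_alt (fechas : String) : String × String :=
  let parts := (PySem.Str.split? fechas " ").getD []
  ((PySem.List.pyGet? parts 0).getD "", (PySem.List.pyGet? parts (-1)).getD "")

-- ===== PRECONDITION & SPEC =====
def Spec_getFechas (fechas : String) (out : String × String) : Prop := out = getFechas_alt fechas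
instance (fechas : String) (out : String × String) : Decidable (Spec_getFechas fechas out) := by unfold Spec_getFechas; infer_instance

-- ===== CLAIM (what is proved, stated in full; the proofs are below) =====
def Claim_equal_getFechas : Prop := ∀ (fechas : String), Dom_getFechas fechas → Spec_getFechas fechas (getFechas fechas)

-- ===== LEMMAS AND PROOFS =====

-- simple structural model of split on a single space
def split1 : List Char → List (List Char)
  | [] => [[]]
  | c :: rest => if c = ' ' then [] :: split1 rest else (split1 rest).modifyHead (c :: ·)

theorem split1_ne_nil (l : List Char) : split1 l ≠ [] := by
  cases l with
  | nil => simp [split1]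
  | cons c rest =>
    simp only [split1]
    split_ifs
    · simp
    · cases h : split1 rest with
      | nil => exact absurd h (split1_ne_nil rest)
      | cons a t => simp

theorem split1_head (l : List Char) : (split1 l).headD [] = l.takeWhile (· ≠ ' ') := by
  induction l with
  | nil => simp [split1]
  | cons c rest ih =>
    simp only [split1, List.takeWhile]
    by_cases hc : c = ' '
    · simp [hc]
    · cases h : split1 rest with
      | nil => exact absurd h (split1_ne_nil rest)
      | cons a t =>
        simp only [if_neg hc, List.modifyHead]
        simp only [h, List.headD] at ih
        simp [hc, ih]

theorem split1_append_single (l : List Char) (c : Char) :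
    split1 (l ++ [c]) =
      if c = ' ' then split1 l ++ [[]]
      else (split1 l).dropLast ++ [(split1 l).getLastD [] ++ [c]] := by
  induction l with
  | nil =>
    simp only [List.nil_append, split1]
    split_ifs <;> simp
  | cons x l ih =>
    simp only [List.cons_append, split1]
    by_cases hx : x = ' '
    · simp only [if_pos hx, ih]
      by_cases hc : c = ' '
      · simp [hc]
      · simp only [if_neg hc]
        cases h : split1 l with
        | nil => exact absurd h (split1_ne_nil l)
        | cons a t => simp
    · simp only [if_neg hx, ih]
      by_cases hc : c = ' '
      · simp only [if_pos hc]
        cases h : split1 l with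
        | nil => exact absurd h (split1_ne_nil l)
        | cons a t => simp
      · simp only [if_neg hc]
        cases h : split1 l with
        | nil => exact absurd h (split1_ne_nil l)
        | cons a t =>
          cases t with
          | nil => simp
          | cons b t' => simp

theorem split1_last (l : List Char) :
    (split1 l).getLastD [] = (l.reverse.takeWhile (· ≠ ' ')).reverse := by
  induction l using List.reverseRecOn with
  | nil => simp [split1]
  | append_singleton l c ih =>
    rw [split1_append_single]
    by_cases hc : c = ' '
    · simp [hc]
    · simp only [if_neg hc, List.getLastD_concat, List.reverse_append,
        List.reverse_singleton, List.singleton_append, List.takeWhile]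
      simp only [List.getLastD_eq_getLast?] at ih
      simp [hc, ih]

-- the fueled splitOn.go of PySem agrees with split1 for the single-space separator
theorem go_eq_split1 (fuel : Nat) (l cur : List Char) (acc : List (List Char)) (hf : l.length ≤ fuel) :
    PySem.Chars.splitOn.go [' '] fuel l cur acc =
      acc.reverse ++ ((cur.reverse ++ (split1 l).headD []) :: (split1 l).tail) := by
  induction fuel generalizing l cur acc with
  | zero =>
    have hl : l = [] := by
      cases l with
      | nil => rfl
      | cons a t => simp at hf
    subst hl
    simp [PySem.Chars.splitOn.go, split1]
  | succ f ih =>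
    cases l with
    | nil => simp [PySem.Chars.splitOn.go, split1]
    | cons c rest =>
      rw [PySem.Chars.splitOn.go.eq_def]
      have hlen : rest.length ≤ f := by simpa using hf
      by_cases hc : c = ' '
      · have hpre : List.isPrefixOf [' '] (c :: rest) = true := by
          simp [List.isPrefixOf, hc]
        simp only [hpre, if_true]
        rw [show List.drop [' '].length (c :: rest) = rest from rfl]
        rw [ih rest [] (cur.reverse :: acc) hlen]
        cases h : split1 rest with
        | nil => exact absurd h (split1_ne_nil rest)
        | cons a t => simp [split1, hc, h]
      · have hpre : List.isPrefixOf [' '] (c :: rest) = false := by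
          simp only [List.isPrefixOf, Bool.and_true]
          exact decide_eq_false fun h => hc h.symm
        simp only [hpre, Bool.false_eq_true, if_false]
        rw [ih rest (c :: cur) acc hlen]
        cases h : split1 rest with
        | nil => exact absurd h (split1_ne_nil rest)
        | cons a t => simp [split1, hc, h]

theorem splitOn_eq_split1 (l : List Char) : PySem.Chars.splitOn l [' '] = split1 l := by
  rw [PySem.Chars.splitOn, go_eq_split1 (l.length + 1) l [] [] (Nat.le_succ _)]
  cases h : split1 l with
  | nil => exact absurd h (split1_ne_nil l)
  | cons a t => simp

-- A's loops compute takeWhile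
theorem iniLoop_eq (l acc : List Char) :
    getFechasIniLoop l acc = acc ++ l.takeWhile (· ≠ ' ') := by
  induction l generalizing acc with
  | nil => simp [getFechasIniLoop]
  | cons c rest ih =>
    simp only [getFechasIniLoop, List.takeWhile]
    by_cases hc : c = ' '
    · simp [hc]
    · simp [hc, ih]

theorem finLoop_eq (l acc : List Char) :
    getFechasFinLoop l acc = (l.takeWhile (· ≠ ' ')).reverse ++ acc := by
  induction l generalizing acc with
  | nil => simp [getFechasFinLoop]
  | cons c rest ih =>
    simp only [getFechasFinLoop, List.takeWhile]
    by_cases hc : c = ' '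
    · simp [hc]
    · simp [hc, ih]

theorem getFechas_alt_eq (fechas : String) :
    getFechas_alt fechas =
      (String.ofList ((split1 fechas.toList).headD []),
       String.ofList ((split1 fechas.toList).getLastD [])) := by
  have hsplit : PySem.Str.split? fechas " " =
      some ((split1 fechas.toList).map String.ofList) := by
    simp [PySem.Str.split?, PySem.Chars.split?]
    rw [splitOn_eq_split1]
  simp only [getFechas_alt, hsplit, Option.getD_some]
  cases h : split1 fechas.toList with
  | nil => exact absurd h (split1_ne_nil _)
  | cons a t =>
    simp only [Prod.mk.injEq]
    refine ⟨?_, ?_⟩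
    · simp [PySem.List.pyGet?, PySem.List.pyIdx?]
    · have hlen : 0 < (a :: t).length := by simp
      simp only [PySem.List.pyGet?, PySem.List.pyIdx?, List.length_map]
      have h1 : ¬ (0 : Int) ≤ -1 := by norm_num
      rw [if_neg h1, if_pos (by omega)]
      simp only [Option.bind_some]
      have hidx : (a :: t).length - ((-(-1 : Int)).toNat) = t.length := by simp
      rw [hidx]
      have : ((a :: t).map String.ofList)[t.length]? =
          some (String.ofList ((a :: t).getLastD [])) := by
        rw [List.getElem?_eq_getElem (by simp)]
        have : (a :: t).getLastD [] = (a :: t).getLast (by simp) := by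
          simp [List.getLastD_eq_getLast?, List.getLast?_eq_some_getLast]
        rw [this, List.getLast_eq_getElem]
        simp only [List.length_cons, Nat.add_sub_cancel]
        rw [List.getElem_map]
      rw [this, Option.getD_some]

-- ===== VERDICT (by name: the statement is the Claim_ definition above) =====
theorem getFechas_spec : Claim_equal_getFechas := by
  intro fechas _
  unfold Spec_getFechas getFechas
  rw [getFechas_alt_eq, iniLoop_eq, finLoop_eq, split1_head, split1_last]
  simp
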